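-- pv_equiv track=rewrite | github.com/lsh330/Triple-Pendulum-LQR | control/supervisor/transition_graph.py | plan_transition
-- ===== SOURCE A (Python) =====
-- from collections import deque
--
-- _CONFIG_BITS = {
--     "DDD": 0b000,
--     "DDU": 0b001,
--     "DUD": 0b010,
--     "DUU": 0b011,
--     "UDD": 0b100,
--     "UDU": 0b101,
--     "UUD": 0b110,
--     "UUU": 0b111,
-- }
--
-- _BITS_CONFIG = {v: k for k, v in _CONFIG_BITS.items()}
--
-- def adjacent_configs(config_name: str) -> list:
--     """Return configurations reachable by flipping exactly one link orientation.
--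
--     Each node in the Hamming graph has exactly 3 neighbours.
--
--     Parameters
--     ----------
--     config_name : str
--         Source configuration name.
--
--     Returns
--     -------
--     list of str
--         Neighbouring configuration names (always length 3).
--     """
--     bits = _CONFIG_BITS[config_name]
--     neighbours = []
--     for bit_pos in range(3):
--         flipped = bits ^ (1 << bit_pos)
--         neighbours.append(_BITS_CONFIG[flipped])
--     return neighbours
--
-- def plan_transition(source: str, target: str) -> list:
--     """Plan shortest-hop path from *source* to *target* using BFS.
--
--     Returns a list of configuration names including both endpoints.
--     The length of the list equals ``hamming_distance(source, target) + 1``.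
--
--     Examples
--     --------
--     >>> plan_transition("DDD", "UUU")
--     ['DDD', 'UDD', 'UUD', 'UUU']   # one valid answer (BFS order may vary)
--
--     Parameters
--     ----------
--     source, target : str
--         Start and end configuration names.
--
--     Returns
--     -------
--     list of str
--         Minimal-hop path, e.g. ``["DDD", "UDD", "UUD", "UUU"]``.
--
--     Raises
--     ------
--     ValueError
--         If either name is unknown (should not happen for valid 3-char codes).
--     """
--     if source not in _CONFIG_BITS:
--         raise ValueError(f"Unknown configuration '{source}'")
--     if target not in _CONFIG_BITS:
--         raise ValueError(f"Unknown configuration '{target}'")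
--     if source == target:
--         return [source]
--
--     visited = {source}
--     queue = deque([(source, [source])])
--
--     while queue:
--         current, path = queue.popleft()
--         for neighbour in adjacent_configs(current):
--             if neighbour == target:
--                 return path + [neighbour]
--             if neighbour not in visited:
--                 visited.add(neighbour)
--                 queue.append((neighbour, path + [neighbour]))
--
--     # Should never be reached for a connected 3-bit Hamming graph
--     raise ValueError(f"No path found from '{source}' to '{target}'")
-- ===== SOURCE B (Python) =====
-- _CONFIG_BITS = {
--     "DDD": 0b000,
--     "DDU": 0b001,
--     "DUD": 0b010,
--     "DUU": 0b011,
--     "UDD": 0b100,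
--     "UDU": 0b101,
--     "UUD": 0b110,
--     "UUU": 0b111,
-- }
--
-- _BITS_CONFIG = {v: k for k, v in _CONFIG_BITS.items()}
--
--
-- def plan_transition(source: str, target: str) -> list:
--     """Build the minimal Hamming path directly by flipping differing bits
--     from bit 0 upward (no queue, no visited set)."""
--     if source not in _CONFIG_BITS:
--         raise ValueError(f"Unknown configuration '{source}'")
--     if target not in _CONFIG_BITS:
--         raise ValueError(f"Unknown configuration '{target}'")
--     if source == target:
--         return [source]
--     s = _CONFIG_BITS[source]
--     t = _CONFIG_BITS[target]
--     current = s
--     path = [source]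
--     for bit_pos in range(3):
--         if (s ^ t) >> bit_pos & 1:
--             current ^= 1 << bit_pos
--             path.append(_BITS_CONFIG[current])
--     return path
-- ===== Notes on version B (the rewrite author's own statement) =====
-- stated objective: simpler
-- what changed: Replaced the BFS with queue and visited set by a direct construction of the minimal path: flip each differing bit of source^target from bit 0 upward, appending the resulting code.
import Mathlib
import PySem

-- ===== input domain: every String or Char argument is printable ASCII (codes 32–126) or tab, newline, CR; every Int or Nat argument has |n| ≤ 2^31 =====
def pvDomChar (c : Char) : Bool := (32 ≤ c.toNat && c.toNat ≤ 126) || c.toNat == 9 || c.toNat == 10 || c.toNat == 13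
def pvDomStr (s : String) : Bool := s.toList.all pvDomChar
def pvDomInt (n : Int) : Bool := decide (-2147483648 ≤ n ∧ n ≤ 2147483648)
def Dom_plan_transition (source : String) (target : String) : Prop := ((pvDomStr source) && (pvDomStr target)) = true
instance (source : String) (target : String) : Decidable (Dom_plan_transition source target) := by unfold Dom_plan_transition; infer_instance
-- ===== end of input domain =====

-- B replaces A's BFS (queue + visited set) by directly flipping the differing
-- bits of source^target from bit 0 upward; objective: simpler. Equivalence is
-- proved on the 64 valid source/target pairs (Pre_ excludes the ValueError inputs).

-- ===== PORT A =====
def configBits : PySem.Dict String Int :=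
  PySem.Dict.ofList [("DDD", 0), ("DDU", 1), ("DUD", 2), ("DUU", 3),
                     ("UDD", 4), ("UDU", 5), ("UUD", 6), ("UUU", 7)]

-- _BITS_CONFIG = {v: k for k, v in _CONFIG_BITS.items()}
def bitsConfig : PySem.Dict Int String :=
  PySem.Dict.ofList (configBits.items.map (fun kv => (kv.2, kv.1)))

-- adjacent_configs; dict lookups use getD (the keys are always present when A calls it)
def adjacentConfigs (config_name : String) : List String :=
  let bits := (configBits.get? config_name).getD 0
  (PySem.List.pyRange 0 3 1).foldl
    (fun neighbours bit_pos =>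
      let flipped := PySem.Int.bxor bits ((1 : Int) <<< bit_pos.toNat)
      neighbours ++ [(bitsConfig.get? flipped).getD ""])
    []

-- the for-loop over adjacent_configs with its early return on neighbour == target
def bfsInner (target : String) (path : List String) :
    List String → PySem.Set String → List (String × List String) →
    Option (List String) × PySem.Set String × List (String × List String)
  | [], visited, queue => (none, visited, queue)
  | n :: ns, visited, queue =>
    if n == target then (some (path ++ [n]), visited, queue)
    else if visited.contains n then bfsInner target path ns visited queue
    else bfsInner target path ns (visited.add n) (queue ++ [(n, path ++ [n])])

-- the while-queue loop; fuel is an upper bound on iterations (each node is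
-- enqueued at most once, so 64 is ample); fuel exhaustion / empty queue
-- correspond to A's unreachable "No path found" raise and return []
def bfsLoop (target : String) :
    Nat → PySem.Set String → List (String × List String) → List String
  | 0, _, _ => []
  | _ + 1, _, [] => []
  | fuel + 1, visited, (current, path) :: rest =>
    match bfsInner target path (adjacentConfigs current) visited rest with
    | (some found, _, _) => found
    | (none, visited', queue') => bfsLoop target fuel visited' queue'

def plan_transition (source : String) (target : String) : List String :=
  if ¬ configBits.contains source then []          -- A raises ValueError here
  else if ¬ configBits.contains target then []     -- A raises ValueError here
  else if source == target then [source]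
  else bfsLoop target 64 (PySem.Set.ofList [source]) [(source, [source])]

-- ===== PORT B =====
def plan_transition_alt (source : String) (target : String) : List String :=
  if ¬ configBits.contains source then []          -- B raises ValueError here
  else if ¬ configBits.contains target then []     -- B raises ValueError here
  else if source == target then [source]
  else
    let s := (configBits.get? source).getD 0
    let t := (configBits.get? target).getD 0
    ((PySem.List.pyRange 0 3 1).foldl
      (fun (st : Int × List String) bit_pos =>
        if PySem.Int.band (PySem.Int.bxor s t >>> bit_pos.toNat) 1 = 1 then
          let current := PySem.Int.bxor st.1 ((1 : Int) <<< bit_pos.toNat)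
          (current, st.2 ++ [(bitsConfig.get? current).getD ""])
        else st)
      (s, [source])).2

-- ===== PRECONDITION & SPEC =====
-- Pre_ excludes exactly the inputs on which A raises ValueError (unknown configuration name).
def Pre_plan_transition (source : String) (target : String) : Prop :=
  source ∈ ["DDD", "DDU", "DUD", "DUU", "UDD", "UDU", "UUD", "UUU"] ∧
  target ∈ ["DDD", "DDU", "DUD", "DUU", "UDD", "UDU", "UUD", "UUU"]
instance (source : String) (target : String) : Decidable (Pre_plan_transition source target) := by
  unfold Pre_plan_transition; infer_instance

def pvWitness_plan_transition : String × String := ("DDD", "UUU")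

def Spec_plan_transition (source : String) (target : String) (out : List String) : Prop := out = plan_transition_alt source target
instance (source : String) (target : String) (out : List String) : Decidable (Spec_plan_transition source target out) := by unfold Spec_plan_transition; infer_instance

-- ===== CLAIM (what is proved, stated in full; the proofs are below) =====
def Claim_equal_plan_transition : Prop := ∀ (source : String) (target : String), Dom_plan_transition source target → Pre_plan_transition source target → Spec_plan_transition source target (plan_transition source target)

-- ===== LEMMAS AND PROOFS =====

-- ===== VERDICT (by name: the statement is the Claim_ definition above) =====
theorem plan_transition_spec : Claim_equal_plan_transition := by
  intro source target _ hpre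
  obtain ⟨hs, ht⟩ := hpre
  fin_cases hs <;> fin_cases ht <;> decide
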